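-- pv_equiv track=rewrite | github.com/SWi98/UWr | Sztuczna inteligencja/Lista1/Zadanie1/source.py | not_neighbor
-- ===== SOURCE A (Python) =====
-- def not_neighbor(a_x, a_y, b):
--     if a_x == b[0] and a_y == b[1]:
--         return False
--     for i in range(-1, 2):
--         for j in range(-1, 2):
--             if a_x == b[0]+i and a_y == b[1]+j:
--                 return False
--     return True
-- ===== SOURCE B (Python) =====
-- def not_neighbor(a_x, a_y, b):
--     dx = a_x - b[0]
--     dy = a_y - b[1]
--     return not (dx in (-1, 0, 1) and dy in (-1, 0, 1))
-- ===== Notes on version B (the rewrite author's own statement) =====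
-- stated objective: simpler
-- what changed: Replaces the redundant initial equality check plus nested 3x3 double loop with two independent 1-D membership tests on the offsets dx and dy, exploiting the product structure of the neighborhood.
import Mathlib
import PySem

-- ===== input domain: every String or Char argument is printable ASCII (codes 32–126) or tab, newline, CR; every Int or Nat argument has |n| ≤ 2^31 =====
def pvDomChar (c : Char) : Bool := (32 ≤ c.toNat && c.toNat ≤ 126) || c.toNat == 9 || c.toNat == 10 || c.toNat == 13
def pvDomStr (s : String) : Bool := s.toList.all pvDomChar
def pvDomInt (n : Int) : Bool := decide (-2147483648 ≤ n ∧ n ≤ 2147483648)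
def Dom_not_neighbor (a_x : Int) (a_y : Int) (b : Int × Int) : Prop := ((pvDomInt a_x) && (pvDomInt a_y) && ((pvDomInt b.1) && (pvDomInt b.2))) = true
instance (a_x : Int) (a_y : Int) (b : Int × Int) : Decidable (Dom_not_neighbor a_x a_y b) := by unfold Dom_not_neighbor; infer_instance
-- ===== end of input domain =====

-- ===== PORT A =====
-- B drops the redundant initial equality check and replaces the 3x3 double loop
-- by two 1-D membership tests on dx, dy (objective: simpler).
def not_neighbor (a_x : Int) (a_y : Int) (b : Int × Int) : Bool :=
  if a_x == b.1 && a_y == b.2 then false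
  else if (PySem.List.pyRange (-1) 2 1).any (fun i =>
         (PySem.List.pyRange (-1) 2 1).any (fun j =>
           a_x == b.1 + i && a_y == b.2 + j)) then false
  else true

-- ===== PORT B =====
def not_neighbor_alt (a_x : Int) (a_y : Int) (b : Int × Int) : Bool :=
  let dx := a_x - b.1
  let dy := a_y - b.2
  !([-1, 0, 1].contains dx && [-1, 0, 1].contains dy)

-- ===== PRECONDITION & SPEC =====
def Spec_not_neighbor (a_x : Int) (a_y : Int) (b : Int × Int) (out : Bool) : Prop := out = not_neighbor_alt a_x a_y b
instance (a_x : Int) (a_y : Int) (b : Int × Int) (out : Bool) : Decidable (Spec_not_neighbor a_x a_y b out) := by unfold Spec_not_neighbor; infer_instance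

-- ===== CLAIM (what is proved, stated in full; the proofs are below) =====
def Claim_equal_not_neighbor : Prop := ∀ (a_x : Int) (a_y : Int) (b : Int × Int), Dom_not_neighbor a_x a_y b → Spec_not_neighbor a_x a_y b (not_neighbor a_x a_y b)

-- ===== LEMMAS AND PROOFS =====

-- ===== VERDICT (by name: the statement is the Claim_ definition above) =====
theorem not_neighbor_spec : Claim_equal_not_neighbor := by
  intro a_x a_y b _
  unfold Spec_not_neighbor not_neighbor not_neighbor_alt
  have hr : PySem.List.pyRange (-1) 2 1 = [-1, 0, 1] := by decide
  rw [hr, Bool.eq_iff_iff]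
  simp only [List.any_cons, List.any_nil, List.contains, Bool.or_false,
    Bool.or_eq_true, Bool.and_eq_true, Bool.not_eq_true', Bool.and_eq_false_iff,
    beq_iff_eq]
  split_ifs with h1 h2 <;> simp_all <;> omega
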